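-- pv_equiv track=rewrite | github.com/proteneer/timemachine | timemachine/fe/single_topology.py | canonicalize_improper_idxs
-- ===== SOURCE A (Python) =====
-- def canonicalize_improper_idxs(idxs) -> tuple[int, int, int, int]:
--     """
--     Canonicalize an improper_idx while being symmetry aware.
--
--     Given idxs (j,c,k,l), where c is the center, and (j,k,l) are neighbors:
--
--     0) Canonicalize the (j,k,l) into (jj,kk,ll) by sorting
--     1) Generate clockwise rotations of (jj,kk,ll)
--     2) Generate counter clockwise rotations of (jj,kk,ll)
--     3) We now can sort 1) and 2) and assign a mapping
--
--     If the (j,k,l) is in the cw rotation ordered set, we're done. Otherwise it must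
--     be in the ccw ordered set. We look up the corresponding idx in the cw set.
--
--     This does not do idxs[0] < idxs[-1] canonicalization.
--     """
--     j, c, k, l = idxs
--
--     # c is the center
--     # generate lexical order
--     key = (j, k, l)
--
--     jj, kk, ll = sorted(key)
--
--     # generate clockwise permutations
--     # note: cw/ccw has nothing to do with the direction of rotation
--     # cw/ccw is related by a pair swap.
--     cw_jkl = (jj, kk, ll)  # starting idxs
--     cw_klj = (kk, ll, jj)  # rotate left
--     cw_ljk = (ll, jj, kk)  # rotate left
--     cw_items = sorted([cw_jkl, cw_klj, cw_ljk])
--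
--     if key in cw_items:
--         return (j, c, k, l)
--
--     # generate counter clockwise permutations
--     ccw_kjl = (kk, jj, ll)  # swap 1st and 2nd element
--     ccw_jlk = (jj, ll, kk)  # rotate left
--     ccw_lkj = (ll, kk, jj)  # rotate left
--     ccw_items = sorted([ccw_kjl, ccw_jlk, ccw_lkj])
--
--     assert key in ccw_items
--
--     for idx, cw_item in enumerate(ccw_items):
--         if cw_item == key:
--             break
--
--     j, k, l = cw_items[idx]
--
--     return (j, c, k, l)
-- ===== SOURCE B (Python) =====
-- def canonicalize_improper_idxs(idxs) -> tuple[int, int, int, int]: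
--     """Symmetry-aware canonicalization of an improper (j,c,k,l), closed form:
--     the neighbor triple (j,k,l) is either an even (cyclic) arrangement of its
--     sorted order -- then it is already canonical -- or an odd one, in which
--     case swapping the last two neighbors gives the matching even arrangement
--     with the same leading neighbor.  No permutation lists are built."""
--     j, c, k, l = idxs
--     if j == k or k == l or j == l or j < k < l or k < l < j or l < j < k:
--         return (j, c, k, l)
--     return (j, c, l, k)
-- ===== Notes on version B (the rewrite author's own statement) =====
-- stated objective: simpler
-- what changed: Replaces A's sort + two sorted 3-permutation lists + enumerate/break index matching by a closed-form orientation test (duplicate or cyclically-sorted neighbors => unchanged, otherwise swap the last two neighbors), building no lists at all.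
import Mathlib
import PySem

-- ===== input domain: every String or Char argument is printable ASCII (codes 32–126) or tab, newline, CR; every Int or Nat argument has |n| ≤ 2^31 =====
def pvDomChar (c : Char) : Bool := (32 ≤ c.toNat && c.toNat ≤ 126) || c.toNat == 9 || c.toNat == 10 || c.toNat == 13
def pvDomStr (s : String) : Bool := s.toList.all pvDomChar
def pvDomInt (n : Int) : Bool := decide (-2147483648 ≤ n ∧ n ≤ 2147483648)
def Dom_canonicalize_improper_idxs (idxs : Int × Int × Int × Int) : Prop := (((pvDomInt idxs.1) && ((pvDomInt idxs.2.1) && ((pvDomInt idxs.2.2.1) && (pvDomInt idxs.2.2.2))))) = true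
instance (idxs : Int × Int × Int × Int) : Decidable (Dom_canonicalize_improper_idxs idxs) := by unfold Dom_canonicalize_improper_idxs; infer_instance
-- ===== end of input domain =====

-- B replaces A's two sorted permutation lists + enumerate/break index matching by a
-- closed-form orientation test and a single swap; objective: simpler (same behaviour).

-- ===== PORT A =====
-- Python's tuple comparison is lexicographic; exact for int 3-tuples:
def pvTripLe (a b : Int × Int × Int) : Bool :=
  if a.1 = b.1 then (if a.2.1 = b.2.1 then decide (a.2.2 ≤ b.2.2) else decide (a.2.1 < b.2.1))
  else decide (a.1 < b.1)

-- stable insertion sort = Python's builtin sorted (exact on int triples: ties are fully equal)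
def pvTripInsert (x : Int × Int × Int) : List (Int × Int × Int) → List (Int × Int × Int)
  | [] => [x]
  | y :: ys => if pvTripLe x y then x :: y :: ys else y :: pvTripInsert x ys

def pvTripSort : List (Int × Int × Int) → List (Int × Int × Int)
  | [] => []
  | x :: xs => pvTripInsert x (pvTripSort xs)

-- sorted(key) on the int triple, same insertion sort (exact for Python's sorted on ints)
def pvIntInsert (x : Int) : List Int → List Int
  | [] => [x]
  | y :: ys => if x ≤ y then x :: y :: ys else y :: pvIntInsert x ys

def pvIntSort : List Int → List Int
  | [] => []
  | x :: xs => pvIntInsert x (pvIntSort xs)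

def canonicalize_improper_idxs (idxs : Int × Int × Int × Int) : Int × Int × Int × Int :=
  let j := idxs.1
  let c := idxs.2.1
  let k := idxs.2.2.1
  let l := idxs.2.2.2
  let key : Int × Int × Int := (j, k, l)
  match pvIntSort [j, k, l] with
  | [jj, kk, ll] =>
    let cw_items := pvTripSort [(jj, kk, ll), (kk, ll, jj), (ll, jj, kk)]
    if key ∈ cw_items then (j, c, k, l)
    else
      let ccw_items := pvTripSort [(kk, jj, ll), (jj, ll, kk), (ll, kk, jj)]
      -- enumerate/break = first index of key; the 'assert key in ccw_items' never fires
      match PySem.List.index? ccw_items key with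
      | some idx =>
        match PySem.List.pyGet? cw_items (idx : Int) with
        | some (a, b, c') => (a, c, b, c')
        | none => (j, c, k, l)   -- unreachable (idx < 3)
      | none => (j, c, k, l)     -- unreachable (assert never fails)
  | _ => (j, c, k, l)            -- unreachable (the sorted list has 3 elements)

-- ===== PORT B =====
def canonicalize_improper_idxs_alt (idxs : Int × Int × Int × Int) : Int × Int × Int × Int :=
  let j := idxs.1
  let c := idxs.2.1
  let k := idxs.2.2.1
  let l := idxs.2.2.2
  if j = k ∨ k = l ∨ j = l ∨ (j < k ∧ k < l) ∨ (k < l ∧ l < j) ∨ (l < j ∧ j < k)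
  then (j, c, k, l) else (j, c, l, k)

-- ===== PRECONDITION & SPEC =====
def Spec_canonicalize_improper_idxs (idxs : Int × Int × Int × Int) (out : Int × Int × Int × Int) : Prop := out = canonicalize_improper_idxs_alt idxs
instance (idxs : Int × Int × Int × Int) (out : Int × Int × Int × Int) : Decidable (Spec_canonicalize_improper_idxs idxs out) := by unfold Spec_canonicalize_improper_idxs; infer_instance

-- ===== CLAIM (what is proved, stated in full; the proofs are below) =====
def Claim_equal_canonicalize_improper_idxs : Prop := ∀ (idxs : Int × Int × Int × Int), Dom_canonicalize_improper_idxs idxs → Spec_canonicalize_improper_idxs idxs (canonicalize_improper_idxs idxs)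

-- ===== LEMMAS AND PROOFS =====

-- ===== VERDICT (by name: the statement is the Claim_ definition above) =====
theorem canonicalize_improper_idxs_spec : Claim_equal_canonicalize_improper_idxs := by
  intro idxs _
  obtain ⟨j, c, k, l⟩ := idxs
  unfold Spec_canonicalize_improper_idxs
  rcases lt_trichotomy j k with h1 | h1 | h1
  · rcases lt_trichotomy k l with h2 | h2 | h2
    · -- j < k < l
      have h3 : j < l := h1.trans h2
      simp_all [canonicalize_improper_idxs, canonicalize_improper_idxs_alt,
        pvIntSort, pvIntInsert, pvTripSort, pvTripInsert, pvTripLe,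
        PySem.List.index?, PySem.List.pyGet?, PySem.List.pyIdx?, List.idxOf?, List.findIdx?, List.findIdx?.go,
        h1.le, h2.le, h3.le, h1.ne, h2.ne, h3.ne, h1.ne', h2.ne', h3.ne',
        h1.asymm, h2.asymm, h3.asymm, not_le.mpr h1, not_le.mpr h2, not_le.mpr h3]
    · -- j < k = l
      subst h2
      simp_all [canonicalize_improper_idxs, canonicalize_improper_idxs_alt,
        pvIntSort, pvIntInsert, pvTripSort, pvTripInsert, pvTripLe,
        PySem.List.index?, PySem.List.pyGet?, PySem.List.pyIdx?, List.idxOf?, List.findIdx?, List.findIdx?.go,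
        h1.le, h1.ne, h1.ne', h1.asymm, not_le.mpr h1]
    · rcases lt_trichotomy j l with h3 | h3 | h3
      · -- j < l < k
        simp_all [canonicalize_improper_idxs, canonicalize_improper_idxs_alt,
          pvIntSort, pvIntInsert, pvTripSort, pvTripInsert, pvTripLe,
          PySem.List.index?, PySem.List.pyGet?, PySem.List.pyIdx?, List.idxOf?, List.findIdx?, List.findIdx?.go,
          h3.le, h2.le, h1.le, h3.ne, h2.ne, h1.ne, h3.ne', h2.ne', h1.ne',
          h3.asymm, h2.asymm, h1.asymm, not_le.mpr h3, not_le.mpr h2, not_le.mpr h1]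
      · -- j = l < k
        subst h3
        simp_all [canonicalize_improper_idxs, canonicalize_improper_idxs_alt,
          pvIntSort, pvIntInsert, pvTripSort, pvTripInsert, pvTripLe,
          PySem.List.index?, PySem.List.pyGet?, PySem.List.pyIdx?, List.idxOf?, List.findIdx?, List.findIdx?.go,
          h1.le, h1.ne, h1.ne', h1.asymm, not_le.mpr h1]
      · -- l < j < k
        have h4 : l < k := h3.trans h1
        simp_all [canonicalize_improper_idxs, canonicalize_improper_idxs_alt,
          pvIntSort, pvIntInsert, pvTripSort, pvTripInsert, pvTripLe,
          PySem.List.index?, PySem.List.pyGet?, PySem.List.pyIdx?, List.idxOf?, List.findIdx?, List.findIdx?.go,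
          h3.le, h1.le, h4.le, h3.ne, h1.ne, h4.ne, h3.ne', h1.ne', h4.ne',
          h3.asymm, h1.asymm, h4.asymm, not_le.mpr h3, not_le.mpr h1, not_le.mpr h4]
  · -- j = k
    rcases lt_trichotomy j l with h2 | h2 | h2
    · subst h1
      simp_all [canonicalize_improper_idxs, canonicalize_improper_idxs_alt,
        pvIntSort, pvIntInsert, pvTripSort, pvTripInsert, pvTripLe,
        PySem.List.index?, PySem.List.pyGet?, PySem.List.pyIdx?, List.idxOf?, List.findIdx?, List.findIdx?.go,
        h2.le, h2.ne, h2.ne', h2.asymm, not_le.mpr h2]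
    · subst h1
      simp_all [canonicalize_improper_idxs, canonicalize_improper_idxs_alt,
        pvIntSort, pvIntInsert, pvTripSort, pvTripInsert, pvTripLe,
        PySem.List.index?, PySem.List.pyGet?, PySem.List.pyIdx?, List.idxOf?, List.findIdx?]
    · subst h1
      simp_all [canonicalize_improper_idxs, canonicalize_improper_idxs_alt,
        pvIntSort, pvIntInsert, pvTripSort, pvTripInsert, pvTripLe,
        PySem.List.index?, PySem.List.pyGet?, PySem.List.pyIdx?, List.idxOf?, List.findIdx?, List.findIdx?.go,
        h2.le, h2.ne, h2.ne', h2.asymm, not_le.mpr h2]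
  · rcases lt_trichotomy k l with h2 | h2 | h2
    · rcases lt_trichotomy j l with h3 | h3 | h3
      · -- k < j < l
        simp_all [canonicalize_improper_idxs, canonicalize_improper_idxs_alt,
          pvIntSort, pvIntInsert, pvTripSort, pvTripInsert, pvTripLe,
          PySem.List.index?, PySem.List.pyGet?, PySem.List.pyIdx?, List.idxOf?, List.findIdx?, List.findIdx?.go,
          h1.le, h3.le, h2.le, h1.ne, h3.ne, h2.ne, h1.ne', h3.ne', h2.ne',
          h1.asymm, h3.asymm, h2.asymm, not_le.mpr h1, not_le.mpr h3, not_le.mpr h2]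
      · -- k < j = l
        subst h3
        simp_all [canonicalize_improper_idxs, canonicalize_improper_idxs_alt,
          pvIntSort, pvIntInsert, pvTripSort, pvTripInsert, pvTripLe,
          PySem.List.index?, PySem.List.pyGet?, PySem.List.pyIdx?, List.idxOf?, List.findIdx?, List.findIdx?.go,
          h1.le, h1.ne, h1.ne', h1.asymm, not_le.mpr h1]
      · -- k < l < j
        simp_all [canonicalize_improper_idxs, canonicalize_improper_idxs_alt,
          pvIntSort, pvIntInsert, pvTripSort, pvTripInsert, pvTripLe,
          PySem.List.index?, PySem.List.pyGet?, PySem.List.pyIdx?, List.idxOf?, List.findIdx?, List.findIdx?.go,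
          h2.le, h3.le, h1.le, h2.ne, h3.ne, h1.ne, h2.ne', h3.ne', h1.ne',
          h2.asymm, h3.asymm, h1.asymm, not_le.mpr h2, not_le.mpr h3, not_le.mpr h1]
    · -- k = l < j
      subst h2
      simp_all [canonicalize_improper_idxs, canonicalize_improper_idxs_alt,
        pvIntSort, pvIntInsert, pvTripSort, pvTripInsert, pvTripLe,
        PySem.List.index?, PySem.List.pyGet?, PySem.List.pyIdx?, List.idxOf?, List.findIdx?, List.findIdx?.go,
        h1.le, h1.ne, h1.ne', h1.asymm, not_le.mpr h1]
    · -- l < k < j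
      have h3 : l < j := h2.trans h1
      simp_all [canonicalize_improper_idxs, canonicalize_improper_idxs_alt,
        pvIntSort, pvIntInsert, pvTripSort, pvTripInsert, pvTripLe,
        PySem.List.index?, PySem.List.pyGet?, PySem.List.pyIdx?, List.idxOf?, List.findIdx?, List.findIdx?.go,
        h2.le, h1.le, h3.le, h2.ne, h1.ne, h3.ne, h2.ne', h1.ne', h3.ne',
        h2.asymm, h1.asymm, h3.asymm, not_le.mpr h2, not_le.mpr h1, not_le.mpr h3]
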